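-- pv_equiv track=rewrite | github.com/KEYBOARDMAN37/GenoAnaCla | code/codon encoding.py | encode_genome_sequences
-- ===== SOURCE A (Python) =====
-- def encode_genome_sequences(dataset):
--     codon_encoding = {
--         'AAA': 1, 'AAC': 2, 'AAG': 3, 'AAT': 4,
--         'ACA': 5, 'ACC': 6, 'ACG': 7, 'ACT': 8,
--         'AGA': 9, 'AGC': 10, 'AGG': 11, 'AGT': 12,
--         'ATA': 13, 'ATC': 14, 'ATG': 15, 'ATT': 16,
--         'CAA': 17, 'CAC': 18, 'CAG': 19, 'CAT': 20,
--         'CCA': 21, 'CCC': 22, 'CCG': 23, 'CCT': 24,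
--         'CGA': 25, 'CGC': 26, 'CGG': 27, 'CGT': 28,
--         'CTA': 29, 'CTC': 30, 'CTG': 31, 'CTT': 32,
--         'GAA': 33, 'GAC': 34, 'GAG': 35, 'GAT': 36,
--         'GCA': 37, 'GCC': 38, 'GCG': 39, 'GCT': 40,
--         'GGA': 41, 'GGC': 42, 'GGG': 43, 'GGT': 44,
--         'GTA': 45, 'GTC': 46, 'GTG': 47, 'GTT': 48,
--         'TAA': 49, 'TAC': 50, 'TAG': 51, 'TAT': 52,
--         'TCA': 53, 'TCC': 54, 'TCG': 55, 'TCT': 56,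
--         'TGA': 57, 'TGC': 58, 'TGG': 59, 'TGT': 60,
--         'TTA': 61, 'TTC': 62, 'TTG': 63, 'TTT': 64
--     }
--
--     encoded_dataset = []
--     for sequence in dataset:
--         encoded_sequence = []
--         for i in range(0, len(sequence), 3):
--             codon = sequence[i:i+3]
--             if len(codon) == 3:
--                 encoded_sequence.append(codon_encoding.get(codon, 0))
--         encoded_dataset.append(encoded_sequence)
--     return encoded_dataset
-- ===== SOURCE B (Python) =====
-- def encode_genome_sequences(dataset):
--     base = {'A': 0, 'C': 1, 'G': 2, 'T': 3}
--     encoded_dataset = []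
--     for sequence in dataset:
--         encoded_sequence = []
--         for i in range(0, len(sequence) - 2, 3):
--             v0 = base.get(sequence[i])
--             v1 = base.get(sequence[i + 1])
--             v2 = base.get(sequence[i + 2])
--             if v0 is None or v1 is None or v2 is None:
--                 encoded_sequence.append(0)
--             else:
--                 encoded_sequence.append(16 * v0 + 4 * v1 + v2 + 1)
--         encoded_dataset.append(encoded_sequence)
--     return encoded_dataset
-- ===== Notes on version B (the rewrite author's own statement) =====
-- stated objective: alternative
-- what changed: Replaces the 64-entry codon dictionary with a 4-entry base map A,C,G,T -> 0..3 and computes each codon code arithmetically as 16*v0+4*v1+v2+1 (0 if any character is unmapped), iterating range(0, len-2, 3) instead of range(0, len, 3) with a slice-length guard.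
import Mathlib
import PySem

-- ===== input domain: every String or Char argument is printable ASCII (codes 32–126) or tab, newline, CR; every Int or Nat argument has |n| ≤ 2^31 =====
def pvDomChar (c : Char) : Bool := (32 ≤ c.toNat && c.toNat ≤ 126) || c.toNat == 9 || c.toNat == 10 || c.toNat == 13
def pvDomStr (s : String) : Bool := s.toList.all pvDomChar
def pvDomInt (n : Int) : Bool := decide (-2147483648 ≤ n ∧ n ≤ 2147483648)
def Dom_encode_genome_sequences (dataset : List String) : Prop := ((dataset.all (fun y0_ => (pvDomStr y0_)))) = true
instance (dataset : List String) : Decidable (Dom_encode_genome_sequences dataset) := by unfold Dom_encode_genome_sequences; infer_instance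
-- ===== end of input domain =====

-- B replaces A's 64-entry codon dictionary by a 4-entry base map and the base-4 formula 16*v0+4*v1+v2+1
-- (0 when any codon character is unmapped), scanning range(0, len-2, 3) instead of guarding on slice length.

-- ===== PORT A =====
-- the literal 64-entry codon dictionary of A (string keys, represented as their character lists)
def codonDict : PySem.Dict (List Char) Int :=
  PySem.Dict.mk [(['A','A','A'], 1), (['A','A','C'], 2), (['A','A','G'], 3), (['A','A','T'], 4),
    (['A','C','A'], 5), (['A','C','C'], 6), (['A','C','G'], 7), (['A','C','T'], 8),
    (['A','G','A'], 9), (['A','G','C'], 10), (['A','G','G'], 11), (['A','G','T'], 12),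
    (['A','T','A'], 13), (['A','T','C'], 14), (['A','T','G'], 15), (['A','T','T'], 16),
    (['C','A','A'], 17), (['C','A','C'], 18), (['C','A','G'], 19), (['C','A','T'], 20),
    (['C','C','A'], 21), (['C','C','C'], 22), (['C','C','G'], 23), (['C','C','T'], 24),
    (['C','G','A'], 25), (['C','G','C'], 26), (['C','G','G'], 27), (['C','G','T'], 28),
    (['C','T','A'], 29), (['C','T','C'], 30), (['C','T','G'], 31), (['C','T','T'], 32),
    (['G','A','A'], 33), (['G','A','C'], 34), (['G','A','G'], 35), (['G','A','T'], 36),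
    (['G','C','A'], 37), (['G','C','C'], 38), (['G','C','G'], 39), (['G','C','T'], 40),
    (['G','G','A'], 41), (['G','G','C'], 42), (['G','G','G'], 43), (['G','G','T'], 44),
    (['G','T','A'], 45), (['G','T','C'], 46), (['G','T','G'], 47), (['G','T','T'], 48),
    (['T','A','A'], 49), (['T','A','C'], 50), (['T','A','G'], 51), (['T','A','T'], 52),
    (['T','C','A'], 53), (['T','C','C'], 54), (['T','C','G'], 55), (['T','C','T'], 56),
    (['T','G','A'], 57), (['T','G','C'], 58), (['T','G','G'], 59), (['T','G','T'], 60),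
    (['T','T','A'], 61), (['T','T','C'], 62), (['T','T','G'], 63), (['T','T','T'], 64)]

def encodeSeqA (cs : List Char) : List Int :=
  (PySem.List.pyRange 0 (PySem.List.len cs) 3).foldl
    (fun acc i =>
      let codon := PySem.List.slice cs (some i) (some (i + 3))
      if PySem.List.len codon == 3 then acc ++ [PySem.Dict.getD codonDict codon 0] else acc) []

def encode_genome_sequences (dataset : List String) : List (List Int) :=
  dataset.foldl (fun acc s => acc ++ [encodeSeqA s.toList]) []

-- ===== PORT B =====
-- the literal 4-entry base dictionary of B
def baseDict : PySem.Dict Char Int := PySem.Dict.mk [('A', 0), ('C', 1), ('G', 2), ('T', 3)]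

-- B's inner body: look up the three codon characters, 0 if any is missing, else the base-4 formula
def enc3 (a b c : Char) : Int :=
  match PySem.Dict.get? baseDict a with
  | none => 0
  | some v0 =>
    match PySem.Dict.get? baseDict b with
    | none => 0
    | some v1 =>
      match PySem.Dict.get? baseDict c with
      | none => 0
      | some v2 => 16 * v0 + 4 * v1 + v2 + 1

def encodeSeqB (cs : List Char) : List Int :=
  (PySem.List.pyRange 0 (PySem.List.len cs - 2) 3).foldl
    (fun acc i =>
      acc ++ [enc3 (PySem.List.pyGetD cs i 'A') (PySem.List.pyGetD cs (i + 1) 'A')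
                (PySem.List.pyGetD cs (i + 2) 'A')]) []

def encode_genome_sequences_alt (dataset : List String) : List (List Int) :=
  dataset.foldl (fun acc s => acc ++ [encodeSeqB s.toList]) []

-- ===== PRECONDITION & SPEC =====
def Spec_encode_genome_sequences (dataset : List String) (out : List (List Int)) : Prop := out = encode_genome_sequences_alt dataset
instance (dataset : List String) (out : List (List Int)) : Decidable (Spec_encode_genome_sequences dataset out) := by unfold Spec_encode_genome_sequences; infer_instance

-- ===== CLAIM (what is proved, stated in full; the proofs are below) =====
def Claim_equal_encode_genome_sequences : Prop := ∀ (dataset : List String), Dom_encode_genome_sequences dataset → Spec_encode_genome_sequences dataset (encode_genome_sequences dataset)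

-- ===== LEMMAS AND PROOFS =====

theorem filter_lt_range (m1 m2 : Nat) (h : m2 ≤ m1) :
    (List.range m1).filter (fun k => decide (k < m2)) = List.range m2 := by
  induction m1 with
  | zero => have : m2 = 0 := by omega
            subst this; simp
  | succ n ih =>
    rw [List.range_succ, List.filter_append]
    by_cases hm : m2 ≤ n
    · rw [ih hm]
      have hn : ¬ n < m2 := by omega
      simp [hn]
    · have hm2 : m2 = n + 1 := by omega
      subst hm2
      rw [List.filter_eq_self.mpr (by
        intro k hk
        simp only [List.mem_range] at hk
        simp
        omega)]
      rw [List.range_succ]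
      simp

-- A's dictionary lookup with default 0 coincides with B's arithmetic encoding on every codon
theorem codon_lookup (a b c : Char) :
    PySem.Dict.getD codonDict [a, b, c] 0 = enc3 a b c := by
  by_cases ha : a = 'A' ∨ a = 'C' ∨ a = 'G' ∨ a = 'T'
  · rcases ha with ha | ha | ha | ha <;> subst ha <;>
    · by_cases hb : b = 'A' ∨ b = 'C' ∨ b = 'G' ∨ b = 'T'
      · rcases hb with hb | hb | hb | hb <;> subst hb <;>
        · by_cases hc : c = 'A' ∨ c = 'C' ∨ c = 'G' ∨ c = 'T'
          · rcases hc with hc | hc | hc | hc <;> subst hc <;> decide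
          · simp only [not_or] at hc
            obtain ⟨h1, h2, h3, h4⟩ := hc
            simp [codonDict, enc3, baseDict, PySem.Dict.getD, PySem.Dict.get?,
              Ne.symm h1, Ne.symm h2, Ne.symm h3, Ne.symm h4]
      · simp only [not_or] at hb
        obtain ⟨h1, h2, h3, h4⟩ := hb
        simp [codonDict, enc3, baseDict, PySem.Dict.getD, PySem.Dict.get?,
          Ne.symm h1, Ne.symm h2, Ne.symm h3, Ne.symm h4]
  · simp only [not_or] at ha
    obtain ⟨h1, h2, h3, h4⟩ := ha
    simp [codonDict, enc3, baseDict, PySem.Dict.getD, PySem.Dict.get?,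
      Ne.symm h1, Ne.symm h2, Ne.symm h3, Ne.symm h4]

-- the indices A's slice-length guard keeps are exactly B's range(0, len-2, 3)
theorem A_filter (cs : List Char) :
    (PySem.List.pyRange 0 (PySem.List.len cs) 3).filter
      (fun i => PySem.List.len (PySem.List.slice cs (some i) (some (i + 3))) == 3)
    = PySem.List.pyRange 0 (PySem.List.len cs - 2) 3 := by
  have h3 : (0:Int) < 3 := by norm_num
  rw [PySem.List.pyRange_of_pos 0 (PySem.List.len cs) h3,
      PySem.List.pyRange_of_pos 0 (PySem.List.len cs - 2) h3,
      PySem.List.len_eq]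
  rw [List.filter_map]
  have hM1 : (if (0:Int) < (cs.length : Int) then (((cs.length : Int) - 0 + 3 - 1) / 3).toNat else 0)
      = (cs.length + 2) / 3 := by split_ifs with h <;> omega
  have hM2 : (if (0:Int) < (cs.length : Int) - 2 then (((cs.length : Int) - 2 - 0 + 3 - 1) / 3).toNat else 0)
      = cs.length / 3 := by split_ifs with h <;> omega
  rw [hM1, hM2]
  have hcong : ∀ k ∈ List.range ((cs.length + 2) / 3),
      ((fun i => PySem.List.len (PySem.List.slice cs (some i) (some (i + 3))) == 3) ∘
        (fun k : Nat => (0:Int) + 3 * ↑k)) k = (fun k : Nat => decide (k < cs.length / 3)) k := by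
    intro k _
    simp only [Function.comp_apply]
    have e1 : ((0:Int) + 3 * ↑k) = ((3 * k : Nat) : Int) := by push_cast; ring
    have e2 : ((0:Int) + 3 * ↑k + 3) = ((3 * k + 3 : Nat) : Int) := by push_cast; ring
    rw [e2, e1, PySem.List.slice_natCast, PySem.List.len_eq]
    simp only [List.length_take, List.length_drop]
    rw [Bool.eq_iff_iff]
    simp only [beq_iff_eq, decide_eq_true_eq]
    omega
  rw [List.filter_congr hcong, filter_lt_range _ _ (by omega)]

theorem seq_eq (cs : List Char) : encodeSeqA cs = encodeSeqB cs := by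
  show (PySem.List.pyRange 0 (PySem.List.len cs) 3).foldl
      (fun acc i =>
        if PySem.List.len (PySem.List.slice cs (some i) (some (i + 3))) == 3 then
          acc ++ [PySem.Dict.getD codonDict (PySem.List.slice cs (some i) (some (i + 3))) 0]
        else acc) []
    = encodeSeqB cs
  unfold encodeSeqB
  rw [PySem.List.foldl_append_if
        (fun i => PySem.List.len (PySem.List.slice cs (some i) (some (i + 3))) == 3)
        (fun i => PySem.Dict.getD codonDict (PySem.List.slice cs (some i) (some (i + 3))) 0),
      PySem.List.foldl_append_singleton_eq_map]
  simp only [List.nil_append]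
  rw [A_filter]
  apply List.map_congr_left
  intro i hi
  rw [PySem.List.mem_pyRange_iff_of_pos (by norm_num)] at hi
  obtain ⟨h0, h1, -⟩ := hi
  obtain ⟨j, rfl⟩ : ∃ j : Nat, i = ↑j := ⟨i.toNat, (Int.toNat_of_nonneg h0).symm⟩
  rw [PySem.List.len_eq] at h1
  have hj : j + 3 ≤ cs.length := by omega
  have hget : ∀ (m : Nat) (hm : m < cs.length), PySem.List.pyGetD cs (↑m) 'A' = cs[m]'hm := by
    intro m hm
    rw [PySem.List.pyGetD_eq_getElem cs 'A' (by positivity) (by exact_mod_cast hm)]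
    simp
  have e3 : ((j:Int) + 3) = ((j + 3 : Nat) : Int) := by push_cast; ring
  have e1 : ((j:Int) + 1) = ((j + 1 : Nat) : Int) := by push_cast; ring
  have e2 : ((j:Int) + 2) = ((j + 2 : Nat) : Int) := by push_cast; ring
  rw [e3, e1, e2, PySem.List.slice_natCast,
      hget j (by omega), hget (j+1) (by omega), hget (j+2) (by omega)]
  have hslice : List.take 3 (List.drop j cs)
      = [cs[j]'(by omega), cs[j+1]'(by omega), cs[j+2]'(by omega)] := by
    rw [List.drop_eq_getElem_cons (show j < cs.length by omega),
        List.drop_eq_getElem_cons (show j + 1 < cs.length by omega),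
        List.drop_eq_getElem_cons (show j + 2 < cs.length by omega)]
    rfl
  simp only [Nat.add_sub_cancel_left]
  rw [hslice, codon_lookup]

theorem ports_eq (dataset : List String) :
    encode_genome_sequences dataset = encode_genome_sequences_alt dataset := by
  unfold encode_genome_sequences encode_genome_sequences_alt
  rw [PySem.List.foldl_append_singleton_eq_map, PySem.List.foldl_append_singleton_eq_map]
  simp only [List.nil_append]
  exact List.map_congr_left (fun s _ => seq_eq s.toList)

-- ===== VERDICT (by name: the statement is the Claim_ definition above) =====
theorem encode_genome_sequences_spec : Claim_equal_encode_genome_sequences := by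
  intro dataset _
  unfold Spec_encode_genome_sequences
  exact ports_eq dataset
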